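-- pv_equiv track=rewrite | github.com/H1drogen/Algorithms | HackerRank/MinMaxRiddle.py | riddle
-- ===== SOURCE A (Python) =====
-- def riddle(arr):
--     ans = []
--     for i in range(1, len(arr) + 1):
--         array = []
--         left_pointer = 0
--         rightpointer = i
--         while rightpointer < len(arr) + 1:
--             subarray = arr[left_pointer:rightpointer]
--             array.append(min(subarray))
--             left_pointer += 1
--             rightpointer += 1
--         ans.append(max(array))
--     return ans
-- ===== SOURCE B (Python) =====
-- def riddle(arr):
--     ans = []
--     mins = list(arr)
--     while mins:
--         ans.append(max(mins))
--         mins = [min(a, b) for a, b in zip(mins, mins[1:])]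
--     return ans
-- ===== Notes on version B (the rewrite author's own statement) =====
-- stated objective: faster
-- what changed: A rebuilds and re-scans every window of every size (O(n^3)); B keeps one row of current window minima and derives the next size's row as the pairwise min of adjacent entries (dynamic programming), taking the row max at each step (O(n^2)).
import Mathlib
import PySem

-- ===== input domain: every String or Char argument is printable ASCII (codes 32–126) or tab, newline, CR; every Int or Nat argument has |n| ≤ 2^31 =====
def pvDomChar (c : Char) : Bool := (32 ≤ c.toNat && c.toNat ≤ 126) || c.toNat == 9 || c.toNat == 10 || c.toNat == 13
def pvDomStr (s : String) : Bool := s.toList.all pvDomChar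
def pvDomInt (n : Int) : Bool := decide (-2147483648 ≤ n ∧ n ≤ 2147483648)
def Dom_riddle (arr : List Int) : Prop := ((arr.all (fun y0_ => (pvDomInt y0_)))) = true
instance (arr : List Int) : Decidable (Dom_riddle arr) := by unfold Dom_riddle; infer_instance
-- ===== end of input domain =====

-- B replaces A's O(n^3) rebuild-every-window scan with an O(n^2) dynamic programme: the row of
-- window-size-(k+1) minima is the pairwise min of adjacent entries of the size-k row (objective: faster).

-- ===== PORT A =====
-- Python's min(subarray)/max(array) are ported as PySem.List.min?/max? with .getD 0; the default is
-- never reached, since every list these are applied to is nonempty whenever the loop body runs.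

def riddleInner (arr : List Int) (lp rp : Int) (array : List Int) : List Int :=
  if rp < (arr.length : Int) + 1 then
    riddleInner arr (lp + 1) (rp + 1)
      (array ++ [(PySem.List.min? (PySem.List.slice arr (some lp) (some rp)) (fun x => x)).getD 0])
  else array
termination_by ((arr.length : Int) + 1 - rp).toNat
decreasing_by omega

def riddle (arr : List Int) : List Int :=
  (PySem.List.pyRange 1 ((arr.length : Int) + 1) 1).foldl
    (fun ans i =>
      ans ++ [(PySem.List.max? (riddleInner arr 0 i []) (fun x => x)).getD 0]) []

-- ===== PORT B =====
def pairMins (mins : List Int) : List Int :=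
  (mins.zip (mins.drop 1)).map (fun p => min p.1 p.2)

def riddleAltGo (mins ans : List Int) : List Int :=
  match mins with
  | [] => ans
  | x :: xs =>
    riddleAltGo (pairMins (x :: xs))
      (ans ++ [(PySem.List.max? (x :: xs) (fun y => y)).getD 0])
termination_by mins.length
decreasing_by simp [pairMins]

def riddle_alt (arr : List Int) : List Int := riddleAltGo arr []


-- ===== PRECONDITION & SPEC =====
def Spec_riddle (arr : List Int) (out : List Int) : Prop := out = riddle_alt arr
instance (arr : List Int) (out : List Int) : Decidable (Spec_riddle arr out) := by unfold Spec_riddle; infer_instance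

-- ===== CLAIM =====
def Claim_equal_riddle : Prop := ∀ (arr : List Int), Dom_riddle arr → Spec_riddle arr (riddle arr)

-- ===== LEMMAS AND PROOFS =====
def pvMin : List Int → Int
  | [] => 0
  | x :: t => t.foldl min x

def pvMax : List Int → Int
  | [] => 0
  | x :: t => t.foldl max x

def pvWin (arr : List Int) (j i : Nat) : List Int := (arr.drop j).take i

def pvW (arr : List Int) (i : Nat) : List Int :=
  (List.range (arr.length + 1 - i)).map (fun j => pvMin (pvWin arr j i))

lemma minGetD (l : List Int) : (PySem.List.min? l (fun x => x)).getD 0 = pvMin l := by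
  cases l with
  | nil =>
    have h : PySem.List.min? ([] : List Int) (fun x => x) = none := by
      rw [PySem.List.min?_eq_none_iff]
    simp [h, pvMin]
  | cons x t => simp [PySem.List.min?_id_cons, pvMin]

lemma maxGetD (l : List Int) : (PySem.List.max? l (fun x => x)).getD 0 = pvMax l := by
  cases l with
  | nil =>
    have h : PySem.List.max? ([] : List Int) (fun x => x) = none := by
      rw [PySem.List.max?_eq_none_iff]
    simp [h, pvMax]
  | cons x t => simp [PySem.List.max?_id_cons, pvMax]

lemma pvMin_cons (x : Int) (t : List Int) (h : t ≠ []) :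
    pvMin (x :: t) = min x (pvMin t) := by
  cases t with
  | nil => exact absurd rfl h
  | cons y s =>
    show (y :: s).foldl min x = min x (s.foldl min y)
    rw [List.foldl_cons, List.foldl_assoc]

lemma pvMin_snoc (l : List Int) (h : l ≠ []) (b : Int) :
    pvMin (l ++ [b]) = min (pvMin l) b := by
  cases l with
  | nil => exact absurd rfl h
  | cons x t =>
    show (t ++ [b]).foldl min x = min (t.foldl min x) b
    rw [List.foldl_append]; rfl

lemma pvWin_cons (arr : List Int) (j i : Nat) (h : j < arr.length) :
    pvWin arr j (i + 1) = arr[j] :: pvWin arr (j + 1) i := by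
  unfold pvWin
  rw [List.drop_eq_getElem_cons h, List.take_succ_cons]

lemma pvWin_snoc (arr : List Int) (j i : Nat) (h : j + i < arr.length) :
    pvWin arr j (i + 1) = pvWin arr j i ++ [arr[j + i]] := by
  unfold pvWin
  have hl : i < (arr.drop j).length := by simp; omega
  rw [List.take_add_one, List.getElem?_eq_getElem hl]
  simp [List.getElem_drop]

lemma pvKey (arr : List Int) (j i : Nat) (hi : 1 ≤ i) (h : j + i < arr.length) :
    min (pvMin (pvWin arr j i)) (pvMin (pvWin arr (j + 1) i)) = pvMin (pvWin arr j (i + 1)) := by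
  obtain ⟨c, rfl⟩ : ∃ c, i = c + 1 := ⟨i - 1, by omega⟩
  have hj : j < arr.length := by omega
  have h2 : (j + 1) + c < arr.length := by omega
  rw [pvWin_cons arr j c hj, pvWin_snoc arr (j+1) c h2,
      pvWin_cons arr j (c+1) hj, pvWin_snoc arr (j+1) c h2]
  cases hc : pvWin arr (j+1) c with
  | nil => simp [pvMin]
  | cons y s =>
    have hne : pvWin arr (j+1) c ≠ [] := by rw [hc]; simp
    rw [← hc]
    rw [pvMin_cons _ _ (by simp [hne]), pvMin_snoc _ hne,
        pvMin_cons _ _ (by simp), pvMin_snoc _ hne]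
    omega

lemma length_pairMins (l : List Int) : (pairMins l).length = l.length - 1 := by
  simp [pairMins]

lemma pairMins_getElem (l : List Int) (j : Nat) (h : j < l.length - 1) :
    (pairMins l)[j]'(by rw [length_pairMins]; exact h) =
      min (l[j]'(by omega)) (l[j+1]'(by omega)) := by
  simp [pairMins]

lemma length_pvW (arr : List Int) (i : Nat) : (pvW arr i).length = arr.length + 1 - i := by
  simp [pvW]

lemma pvW_getElem (arr : List Int) (i j : Nat) (h : j < arr.length + 1 - i) :
    (pvW arr i)[j]'(by rw [length_pvW]; exact h) = pvMin (pvWin arr j i) := by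
  simp [pvW]

lemma pairMins_pvW (arr : List Int) (i : Nat) (hi : 1 ≤ i) (hn : i ≤ arr.length) :
    pairMins (pvW arr i) = pvW arr (i + 1) := by
  apply List.ext_getElem
  · rw [length_pairMins, length_pvW, length_pvW]; omega
  · intro j h1 h2
    have hj : j < arr.length - i := by rw [length_pairMins, length_pvW] at h1; omega
    rw [pairMins_getElem _ j (by rw [length_pvW]; omega)]
    rw [pvW_getElem arr (i+1) j (by omega)]
    have e1 := pvW_getElem arr i j (by omega)
    have e2 := pvW_getElem arr i (j+1) (by omega)
    simp only [e1, e2]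
    exact pvKey arr j i hi (by omega)

lemma pvW_one (arr : List Int) : pvW arr 1 = arr := by
  apply List.ext_getElem
  · simp [length_pvW]
  · intro j h1 h2
    rw [pvW_getElem arr 1 j (by omega)]
    have : pvWin arr j 1 = [arr[j]] := by
      rw [show (1 : Nat) = 0 + 1 from rfl, pvWin_cons arr j 0 (by omega)]
      rfl
    rw [this]; rfl

lemma inner_spec (arr : List Int) : ∀ (m j i : Nat) (acc : List Int),
    m = arr.length + 1 - (j + i) →
    riddleInner arr (j : Int) ((j + i : Nat) : Int) acc =
      acc ++ (List.range m).map (fun t => pvMin (pvWin arr (j + t) i)) := by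
  intro m
  induction m with
  | zero =>
    intro j i acc hm
    rw [riddleInner]
    rw [if_neg (by push_cast; omega)]
    simp
  | succ m ih =>
    intro j i acc hm
    rw [riddleInner]
    rw [if_pos (by push_cast; omega)]
    have hs : PySem.List.slice arr (some (j : Int)) (some ((j + i : Nat) : Int)) = pvWin arr j i := by
      rw [PySem.List.slice_natCast]
      unfold pvWin
      congr 1
      omega
    have harg : ((j : Int) + 1) = ((j + 1 : Nat) : Int) := by push_cast; ring
    have harg2 : (((j + i : Nat) : Int) + 1) = (((j + 1) + i : Nat) : Int) := by push_cast; ring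
    rw [hs, minGetD, harg, harg2, ih (j+1) i _ (by omega)]
    rw [List.range_succ_eq_map]
    simp [List.map_map, Function.comp]
    intro t _
    have h3 : j + 1 + t = j + (t + 1) := by omega
    rw [h3]

lemma go_spec (arr : List Int) : ∀ (m i : Nat) (ans : List Int),
    1 ≤ i → m = arr.length + 1 - i →
    riddleAltGo (pvW arr i) ans = ans ++ (List.range m).map (fun t => pvMax (pvW arr (i + t))) := by
  intro m
  induction m with
  | zero =>
    intro i ans hi hm
    have : pvW arr i = [] := by
      apply List.eq_nil_of_length_eq_zero
      rw [length_pvW]; omega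
    rw [this, riddleAltGo]
    simp
  | succ m ih =>
    intro i ans hi hm
    have hn : i ≤ arr.length := by omega
    have hne : pvW arr i ≠ [] := by
      intro h
      have := length_pvW arr i
      rw [h] at this; simp at this; omega
    obtain ⟨x, xs, hx⟩ := List.exists_cons_of_ne_nil hne
    rw [hx, riddleAltGo, ← hx, pairMins_pvW arr i hi hn]
    rw [ih (i+1) _ (by omega) (by omega)]
    rw [hx, maxGetD, ← hx]
    rw [List.range_succ_eq_map]
    simp [List.map_map, Function.comp]
    intro t _
    have h3 : i + 1 + t = i + (t + 1) := by omega
    rw [h3]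


theorem pvMain (arr : List Int) : riddle arr = riddle_alt arr := by
  unfold riddle riddle_alt
  rw [PySem.List.foldl_append_singleton_eq_map]
  rw [PySem.List.pyRange_one]
  have hn : (((arr.length : Int) + 1 - 1)).toNat = arr.length := by omega
  rw [hn]
  have hb : riddleAltGo arr [] = (List.range arr.length).map (fun t => pvMax (pvW arr (1 + t))) := by
    conv_lhs => rw [← pvW_one arr]
    rw [go_spec arr arr.length 1 [] (by omega) (by omega)]
    simp
  rw [hb, List.map_map]
  simp only [List.nil_append]
  apply List.map_congr_left
  intro k hk
  simp only [Function.comp]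
  have h0 : (1 : Int) + (k : Int) = ((0 + (1 + k) : Nat) : Int) := by push_cast; ring
  have hi := inner_spec arr (arr.length + 1 - (1 + k)) 0 (1 + k) [] (by omega)
  rw [Nat.cast_zero] at hi
  rw [h0, hi, maxGetD]
  simp only [List.nil_append]
  have : (List.range (arr.length + 1 - (1 + k))).map (fun t => pvMin (pvWin arr (0 + t) (1 + k))) = pvW arr (1 + k) := by
    unfold pvW
    apply List.map_congr_left
    intro t _
    simp
  rw [this]

-- ===== VERDICT =====
theorem riddle_spec : Claim_equal_riddle := by
  intro arr _
  unfold Spec_riddle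
  exact pvMain arr
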